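-- pv_equiv track=rewrite | github.com/ayinam-alekhya/Knowledge-Retrieval-Task-Tree-Generation | Project2/Part2/AlekhyaAyinam/main_script.py | determineObjectDistribution
-- ===== SOURCE A (Python) =====
-- def determineObjectDistribution(objects, box_position):
--     distribution = [0, 0, 0, 0]
--     for obj in objects:
--         if obj[0] >= box_position[0]:
--             if obj[1] >= box_position[1]:
--                 distribution[0] += 1
--             else:
--                 distribution[3] += 1
--         else:
--             if obj[1] >= box_position[1]:
--                 distribution[1] += 1
--             else:
--                 distribution[2] += 1
--     return distribution
-- ===== SOURCE B (Python) =====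
-- def determineObjectDistribution(objects, box_position):
--     bx, by = box_position
--     q0 = sum(1 for o in objects if o[0] >= bx and o[1] >= by)
--     q1 = sum(1 for o in objects if o[0] < bx and o[1] >= by)
--     q2 = sum(1 for o in objects if o[0] < bx and o[1] < by)
--     q3 = sum(1 for o in objects if o[0] >= bx and o[1] < by)
--     return [q0, q1, q2, q3]
-- ===== Notes on version B (the rewrite author's own statement) =====
-- stated objective: alternative
-- what changed: Replaces the single branch-routing loop that mutates a 4-cell list with four independent counting passes (one per quadrant predicate), assembling the result list once at the end.
import Mathlib
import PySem

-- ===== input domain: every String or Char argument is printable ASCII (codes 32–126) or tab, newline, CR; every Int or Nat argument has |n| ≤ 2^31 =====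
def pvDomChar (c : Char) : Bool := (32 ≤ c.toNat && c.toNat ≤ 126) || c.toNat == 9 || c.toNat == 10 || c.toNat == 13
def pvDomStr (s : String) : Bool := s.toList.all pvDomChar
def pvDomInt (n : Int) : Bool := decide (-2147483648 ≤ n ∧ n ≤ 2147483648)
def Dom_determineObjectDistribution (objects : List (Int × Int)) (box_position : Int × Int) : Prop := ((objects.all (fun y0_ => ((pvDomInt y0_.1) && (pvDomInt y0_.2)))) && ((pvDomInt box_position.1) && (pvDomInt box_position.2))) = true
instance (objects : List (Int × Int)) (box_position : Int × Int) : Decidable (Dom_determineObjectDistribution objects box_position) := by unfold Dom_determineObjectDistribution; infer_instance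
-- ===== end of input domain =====

-- B replaces A's single branch-routing loop over a mutable 4-cell list with four independent quadrant counts (alternative decomposition, same cost).

-- ===== PORT A =====
-- the loop body of A (the nested if/else updating the 4-cell list), as a named helper
def stepA (bx by_ : Int) (distribution : List Int) (obj : Int × Int) : List Int :=
  if obj.1 ≥ bx then
    if obj.2 ≥ by_ then
      [distribution[0]! + 1, distribution[1]!, distribution[2]!, distribution[3]!]
    else
      [distribution[0]!, distribution[1]!, distribution[2]!, distribution[3]! + 1]
  else
    if obj.2 ≥ by_ then
      [distribution[0]!, distribution[1]! + 1, distribution[2]!, distribution[3]!]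
    else
      [distribution[0]!, distribution[1]!, distribution[2]! + 1, distribution[3]!]

def determineObjectDistribution (objects : List (Int × Int)) (box_position : Int × Int) : List Int :=
  objects.foldl (stepA box_position.1 box_position.2) [0, 0, 0, 0]

-- ===== PORT B =====
def determineObjectDistribution_alt (objects : List (Int × Int)) (box_position : Int × Int) : List Int :=
  let bx := box_position.1
  let by_ := box_position.2
  let q0 : Int := (objects.countP (fun o => o.1 ≥ bx ∧ o.2 ≥ by_) : Nat)
  let q1 : Int := (objects.countP (fun o => o.1 < bx ∧ o.2 ≥ by_) : Nat)
  let q2 : Int := (objects.countP (fun o => o.1 < bx ∧ o.2 < by_) : Nat)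
  let q3 : Int := (objects.countP (fun o => o.1 ≥ bx ∧ o.2 < by_) : Nat)
  [q0, q1, q2, q3]

-- ===== PRECONDITION & SPEC =====
def Spec_determineObjectDistribution (objects : List (Int × Int)) (box_position : Int × Int) (out : List Int) : Prop := out = determineObjectDistribution_alt objects box_position
instance (objects : List (Int × Int)) (box_position : Int × Int) (out : List Int) : Decidable (Spec_determineObjectDistribution objects box_position out) := by unfold Spec_determineObjectDistribution; infer_instance

-- ===== CLAIM (what is proved, stated in full; the proofs are below) =====
def Claim_equal_determineObjectDistribution : Prop := ∀ (objects : List (Int × Int)) (box_position : Int × Int), Dom_determineObjectDistribution objects box_position → Spec_determineObjectDistribution objects box_position (determineObjectDistribution objects box_position)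

-- ===== LEMMAS AND PROOFS =====
-- loop invariant of A's fold: starting from [a,b,c,d] it adds the four quadrant counts componentwise
theorem fold_inv (objects : List (Int × Int)) (bx by_ : Int) (a b c d : Int) :
    objects.foldl (stepA bx by_) [a, b, c, d] =
    [a + (objects.countP (fun o => o.1 ≥ bx ∧ o.2 ≥ by_) : Nat),
     b + (objects.countP (fun o => o.1 < bx ∧ o.2 ≥ by_) : Nat),
     c + (objects.countP (fun o => o.1 < bx ∧ o.2 < by_) : Nat),
     d + (objects.countP (fun o => o.1 ≥ bx ∧ o.2 < by_) : Nat)] := by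
  induction objects generalizing a b c d with
  | nil => simp
  | cons hd tl ih =>
      rw [List.foldl_cons]
      by_cases h1 : bx ≤ hd.1
      · by_cases h2 : by_ ≤ hd.2
        · rw [show stepA bx by_ [a, b, c, d] hd = [a + 1, b, c, d] by simp [stepA, h1, h2], ih]
          simp [h1, h2, not_lt.mpr h1, not_lt.mpr h2]
          ring
        · rw [show stepA bx by_ [a, b, c, d] hd = [a, b, c, d + 1] by simp [stepA, h1, h2], ih]
          simp [h1, h2, not_lt.mpr h1, not_le.mp h2]
          ring
      · by_cases h2 : by_ ≤ hd.2
        · rw [show stepA bx by_ [a, b, c, d] hd = [a, b + 1, c, d] by simp [stepA, h1, h2], ih]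
          simp [h1, h2, not_le.mp h1, not_lt.mpr h2]
          ring
        · rw [show stepA bx by_ [a, b, c, d] hd = [a, b, c + 1, d] by simp [stepA, h1, h2], ih]
          simp [h1, h2, not_le.mp h1, not_le.mp h2]
          ring

-- ===== VERDICT (by name: the statement is the Claim_ definition above) =====
theorem determineObjectDistribution_spec : Claim_equal_determineObjectDistribution := by
  intro objects box_position _
  unfold Spec_determineObjectDistribution determineObjectDistribution determineObjectDistribution_alt
  rw [fold_inv]
  simp
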